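-- pv_equiv track=rewrite | github.com/l-asuming/Codewars-Tasks | Codewars tasks/Codewars 16.py | tram
-- ===== SOURCE A (Python) =====
-- def tram(stops, descending, onboarding):
--     number_of_passengers = []
--     number_of_passengers.append(onboarding[0])
--     i = 0
--     while i < stops-1:
--         number_of_passengers.append(number_of_passengers[i]-descending[i+1]+onboarding[i+1])
--         i += 1
--     return max(number_of_passengers)
-- ===== SOURCE B (Python) =====
-- def tram(stops, descending, onboarding):
--     # Net boarding delta per stop; the tram's load after stop k is the prefix
--     # sum deltas[0]+...+deltas[k], so the answer is the maximum nonempty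
--     # prefix sum of `deltas`.  Compute it with a backward scan using the
--     # identity  maxprefix(d :: rest) = max(d, d + maxprefix(rest)).
--     deltas = [onboarding[0]] + [onboarding[i] - descending[i] for i in range(1, stops)]
--     best = deltas[-1]
--     for d in reversed(deltas[:-1]):
--         best = max(d, d + best)
--     return best
-- ===== Notes on version B (the rewrite author's own statement) =====
-- stated objective: alternative
-- what changed: B never tracks the running passenger count: it builds the per-stop net-delta list once and then computes the maximum nonempty prefix sum by a backward scan using maxprefix(d::rest)=max(d,d+maxprefix(rest)), instead of A's forward loop that appends each new count to a list it indexes back into and then calls max().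
import Mathlib
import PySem

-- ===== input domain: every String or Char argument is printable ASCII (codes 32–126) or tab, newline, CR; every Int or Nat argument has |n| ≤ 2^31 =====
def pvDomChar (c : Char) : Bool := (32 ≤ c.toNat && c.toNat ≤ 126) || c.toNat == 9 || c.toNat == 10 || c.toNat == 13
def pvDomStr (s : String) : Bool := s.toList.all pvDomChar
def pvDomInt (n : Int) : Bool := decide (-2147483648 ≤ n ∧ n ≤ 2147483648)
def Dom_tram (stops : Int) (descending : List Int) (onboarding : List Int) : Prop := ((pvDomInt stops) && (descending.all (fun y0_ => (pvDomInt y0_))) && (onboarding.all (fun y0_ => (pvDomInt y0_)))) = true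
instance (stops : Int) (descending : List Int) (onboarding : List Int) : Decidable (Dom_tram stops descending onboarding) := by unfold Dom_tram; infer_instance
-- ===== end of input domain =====

-- B builds the per-stop net-delta list once and computes its maximum nonempty prefix
-- sum by a BACKWARD scan (maxprefix(d::rest) = max(d, d+maxprefix(rest))), instead of
-- A's forward loop appending running counts to a list and max()-ing it.

-- ===== PORT A =====
def tram (stops : Int) (descending : List Int) (onboarding : List Int) : Int :=
  -- number_of_passengers = [onboarding[0]]; while i < stops-1: append np[i]-descending[i+1]+onboarding[i+1]
  let np := (PySem.List.pyRange 0 (stops - 1) 1).foldl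
    (fun np i =>
      np ++ [PySem.List.pyGetD np i 0 - PySem.List.pyGetD descending (i + 1) 0
               + PySem.List.pyGetD onboarding (i + 1) 0])
    [PySem.List.pyGetD onboarding 0 0]
  (PySem.List.max? np (fun y => y)).getD 0

-- ===== PORT B =====
def tram_alt (stops : Int) (descending : List Int) (onboarding : List Int) : Int :=
  -- deltas = [onboarding[0]] + [onboarding[i]-descending[i] for i in range(1, stops)]
  let deltas := PySem.List.pyGetD onboarding 0 0 ::
    (PySem.List.pyRange 1 stops 1).map
      (fun i => PySem.List.pyGetD onboarding i 0 - PySem.List.pyGetD descending i 0)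
  -- best = deltas[-1]; for d in reversed(deltas[:-1]): best = max(d, d+best)
  (deltas.dropLast.reverse).foldl (fun best d => max d (d + best))
    (PySem.List.pyGetD deltas (-1) 0)

-- ===== PRECONDITION & SPEC =====
-- Pre_ excludes exactly the inputs where Python A raises IndexError: empty onboarding
-- (onboarding[0]), or stops ≥ 2 with either list shorter than stops (indices 1..stops-1 read).
def Pre_tram (stops : Int) (descending : List Int) (onboarding : List Int) : Prop :=
  onboarding ≠ [] ∧ (1 < stops → stops ≤ (descending.length : Int) ∧ stops ≤ (onboarding.length : Int))
instance (stops : Int) (descending : List Int) (onboarding : List Int) : Decidable (Pre_tram stops descending onboarding) := by unfold Pre_tram; infer_instance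

def pvWitness_tram : Int × List Int × List Int := (3, [0, 2, 4], [5, 3, 1])

def Spec_tram (stops : Int) (descending : List Int) (onboarding : List Int) (out : Int) : Prop := out = tram_alt stops descending onboarding
instance (stops : Int) (descending : List Int) (onboarding : List Int) (out : Int) : Decidable (Spec_tram stops descending onboarding out) := by unfold Spec_tram; infer_instance

-- ===== CLAIM (what is proved, stated in full; the proofs are below) =====
def Claim_equal_tram : Prop := ∀ (stops : Int) (descending : List Int) (onboarding : List Int), Dom_tram stops descending onboarding → Pre_tram stops descending onboarding → Spec_tram stops descending onboarding (tram stops descending onboarding)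

-- ===== LEMMAS AND PROOFS =====

-- prefix-sum scan: ps x ds = [x, x+d0, x+d0+d1, …] (A's passenger list abstractly)
def ps (x : Int) : List Int → List Int
  | [] => [x]
  | d :: ds => x :: ps (x + d) ds

-- maximum nonempty prefix sum, as B's backward recurrence computes it
def mp : List Int → Int
  | [] => 0
  | [d] => d
  | d :: e :: rest => max d (d + mp (e :: rest))

theorem ps_head (ds : List Int) (x : Int) : ps x ds = x :: (ps x ds).tail := by
  cases ds <;> rfl

theorem ps_length (ds : List Int) : ∀ x : Int, (ps x ds).length = ds.length + 1 := by
  induction ds with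
  | nil => intro x; rfl
  | cons d ds ih => intro x; simp [ps, ih]

theorem ps_getLast? (ds : List Int) : ∀ x : Int, (ps x ds).getLast? = some (x + ds.sum) := by
  induction ds with
  | nil => intro x; simp [ps]
  | cons d ds ih =>
    intro x
    rw [ps, ps_head ds (x + d), List.getLast?_cons_cons, ← ps_head ds (x + d), ih]
    simp; ring

theorem ps_append (ds : List Int) : ∀ (x d : Int), ps x (ds ++ [d]) = ps x ds ++ [x + ds.sum + d] := by
  induction ds with
  | nil => intro x d; simp [ps]
  | cons e ds ih =>
    intro x d
    simp only [List.cons_append, ps, ih]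
    simp; ring_nf

theorem foldl_max_comm (t : List Int) : ∀ a b : Int, t.foldl max (max a b) = max a (t.foldl max b) := by
  induction t with
  | nil => intro a b; rfl
  | cons c t ih =>
    intro a b
    simp only [List.foldl]
    rw [max_assoc, ih]

theorem mp_shift (ds : List Int) (d x : Int) : x + mp (d :: ds) = mp ((x + d) :: ds) := by
  cases ds with
  | nil => rfl
  | cons e rest => simp only [mp]; omega

theorem maxlist_ps (ds : List Int) : ∀ x : Int, (ps x ds).tail.foldl max x = mp (x :: ds) := by
  induction ds with
  | nil => intro x; rfl
  | cons d ds ih =>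
    intro x
    rw [ps, List.tail_cons, ps_head ds (x + d), List.foldl_cons,
        foldl_max_comm _ x (x + d), ih (x + d), ← mp_shift]
    simp [mp]

-- B's backward loop computes mp on any nonempty list
theorem revfold_eq_mp (l : List Int) : ∀ x : Int,
    ((x :: l).dropLast.reverse).foldl (fun best d => max d (d + best))
      (PySem.List.pyGetD (x :: l) (-1) 0) = mp (x :: l) := by
  induction l with
  | nil =>
    intro x
    simp [PySem.List.pyGetD_neg_one (x :: ([] : List Int)) 0 (by simp), mp]
  | cons e rest ih =>
    intro x
    have hdrop : (x :: e :: rest).dropLast = x :: (e :: rest).dropLast := by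
      simp [List.dropLast]
    have hlast : PySem.List.pyGetD (x :: e :: rest) (-1) 0
        = PySem.List.pyGetD (e :: rest) (-1) 0 := by
      rw [PySem.List.pyGetD_neg_one (x :: e :: rest) 0 (by simp),
          PySem.List.pyGetD_neg_one (e :: rest) 0 (by simp)]
      simp [List.getLast]
    rw [hdrop, List.reverse_cons, List.foldl_append, hlast, ih e]
    simp only [List.foldl, mp]

-- A's while-loop builds exactly the prefix-sum list of the deltas
theorem loopA (descending onboarding : List Int) (x : Int) : ∀ n : Nat,
    (PySem.List.pyRange 0 (n : Int) 1).foldl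
      (fun np i =>
        np ++ [PySem.List.pyGetD np i 0 - PySem.List.pyGetD descending (i + 1) 0
                 + PySem.List.pyGetD onboarding (i + 1) 0])
      [x]
    = ps x ((PySem.List.pyRange 1 ((n : Int) + 1) 1).map
        (fun i => PySem.List.pyGetD onboarding i 0 - PySem.List.pyGetD descending i 0)) := by
  intro n
  induction n with
  | zero => simp [PySem.List.pyRange_one_eq_nil, ps]
  | succ n ih =>
    have hA : PySem.List.pyRange 0 ((n + 1 : Nat) : Int) 1
        = PySem.List.pyRange 0 (n : Int) 1 ++ [(n : Int)] := by
      have := PySem.List.pyRange_one_succ_right (a := 0) (b := (n : Int)) (by omega)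
      push_cast
      simpa using this
    have hB : PySem.List.pyRange 1 (((n + 1 : Nat) : Int) + 1) 1
        = PySem.List.pyRange 1 ((n : Int) + 1) 1 ++ [(n : Int) + 1] := by
      have := PySem.List.pyRange_one_succ_right (a := 1) (b := (n : Int) + 1) (by omega)
      push_cast
      simpa using this
    set ds := (PySem.List.pyRange 1 ((n : Int) + 1) 1).map
      (fun i => PySem.List.pyGetD onboarding i 0 - PySem.List.pyGetD descending i 0) with hds
    have hdslen : ds.length = n := by
      rw [hds, List.length_map, PySem.List.length_pyRange_one]
      omega
    rw [hA, List.foldl_append, ih]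
    have hget : PySem.List.pyGetD (ps x ds) ((n : Int)) 0 = x + ds.sum := by
      have h1 : PySem.List.pyGetD (ps x ds) ((n : Int)) 0 = (ps x ds).getD n 0 :=
        PySem.List.pyGetD_natCast (ps x ds) n 0
      have h2 : (ps x ds).getLast? = (ps x ds)[(ps x ds).length - 1]? :=
        List.getLast?_eq_getElem?
      rw [ps_getLast? ds x, ps_length ds x] at h2
      simp only [hdslen, Nat.add_sub_cancel] at h2
      rw [h1, List.getD_eq_getElem?_getD, ← h2]
      rfl
    rw [hB, List.map_append]
    simp only [List.map_cons, List.map_nil]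
    rw [← hds, ps_append ds x]
    simp only [List.foldl_cons, List.foldl_nil, hget]
    have harith : x + ds.sum - PySem.List.pyGetD descending ((n : Int) + 1) 0
        + PySem.List.pyGetD onboarding ((n : Int) + 1) 0
        = x + ds.sum + (PySem.List.pyGetD onboarding ((n : Int) + 1) 0
            - PySem.List.pyGetD descending ((n : Int) + 1) 0) := by ring
    rw [harith]

theorem tram_eq (stops : Int) (descending onboarding : List Int) :
    tram stops descending onboarding = tram_alt stops descending onboarding := by
  unfold tram tram_alt
  by_cases hs : stops ≤ 1
  · have h1 : PySem.List.pyRange 0 (stops - 1) 1 = [] :=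
      PySem.List.pyRange_one_eq_nil (by omega)
    have h2 : PySem.List.pyRange 1 stops 1 = [] :=
      PySem.List.pyRange_one_eq_nil (by omega)
    have h3 : PySem.List.pyGetD [PySem.List.pyGetD onboarding 0 0] (-1) 0
        = PySem.List.pyGetD onboarding 0 0 := by
      rw [PySem.List.pyGetD_neg_one ([PySem.List.pyGetD onboarding 0 0]) 0 (by simp)]
      rfl
    simp [h1, h2, PySem.List.max?_id_cons, h3]
  · obtain ⟨n, hn⟩ : ∃ n : Nat, (n : Int) = stops - 1 :=
      ⟨(stops - 1).toNat, by omega⟩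
    set x := PySem.List.pyGetD onboarding 0 0
    have hL := loopA descending onboarding x n
    rw [hn] at hL
    have hstops : stops - 1 + 1 = stops := by ring
    rw [hstops] at hL
    set ds := (PySem.List.pyRange 1 stops 1).map
      (fun i => PySem.List.pyGetD onboarding i 0 - PySem.List.pyGetD descending i 0) with hds
    have hmax : (PySem.List.max? (ps x ds) (fun y => y)).getD 0 = mp (x :: ds) := by
      rw [ps_head ds x, PySem.List.max?_id_cons, Option.getD_some]
      exact maxlist_ps ds x
    have hB2 := revfold_eq_mp ds x
    simp only [hL, hmax, hB2]

-- ===== VERDICT (by name: the statement is the Claim_ definition above) =====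
theorem tram_spec : Claim_equal_tram := by
  intro stops descending onboarding _ _
  exact tram_eq stops descending onboarding
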